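-- pv_equiv track=rewrite | github.com/MegaVako/seleniumXxiecheng | seleniumXC.py | seperateFlightNum
-- ===== SOURCE A (Python) =====
-- def seperateFlightNum(flightNum):
--     counterCur = 0
--     counterNonDig = 0
--     flightList = []
--     for x in flightNum:
--         if not x.isdigit():
--             counterNonDig += 1
--         counterCur += 1
--         if counterNonDig == 3:
--             counterCur -= 1
--             flightList.append(flightNum[:counterCur])
--             flightList.append(flightNum[counterCur:])
--             return flightList
--     return [flightNum, None]
-- ===== SOURCE B (Python) =====
-- DIGITS = "0123456789"
--
-- def seperateFlightNum(flightNum):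
--     # peel digit-runs off the front: after three rounds of
--     # "drop leading digits, then consume one non-digit", the remaining
--     # suffix starts at the 3rd non-digit; recover the split from lengths.
--     t = flightNum.lstrip(DIGITS)
--     t = t[1:].lstrip(DIGITS)
--     t = t[1:].lstrip(DIGITS)
--     if t:
--         k = len(flightNum) - len(t)
--         return [flightNum[:k], flightNum[k:]]
--     return [flightNum, None]
-- ===== Notes on version B (the rewrite author's own statement) =====
-- stated objective: alternative
-- what changed: Replaces A's single counted scan (per-character non-digit counter with early exit and index bookkeeping) by suffix peeling: three rounds of lstrip-digits-then-consume-one-character, recovering the split point from the leftover suffix length.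
import Mathlib
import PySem

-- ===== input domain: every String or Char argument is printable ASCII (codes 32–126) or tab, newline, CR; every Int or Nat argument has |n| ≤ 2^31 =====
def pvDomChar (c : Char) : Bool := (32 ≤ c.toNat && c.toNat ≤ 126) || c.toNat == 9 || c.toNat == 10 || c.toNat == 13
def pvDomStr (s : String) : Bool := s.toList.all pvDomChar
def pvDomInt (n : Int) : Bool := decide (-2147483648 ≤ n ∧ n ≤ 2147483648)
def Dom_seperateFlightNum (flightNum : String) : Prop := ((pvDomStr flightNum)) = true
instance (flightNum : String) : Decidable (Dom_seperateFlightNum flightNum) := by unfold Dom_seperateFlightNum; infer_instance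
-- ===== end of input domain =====

-- B replaces A's counted single scan by suffix peeling: three rounds of "strip leading digits, consume one
-- non-digit", recovering the split point from the leftover length (simpler, no index/counter bookkeeping).

-- ===== PORT A =====
-- the for-loop with its two counters; early return when the 3rd non-digit is seen
def sepLoopA (flightNum : String) (chars : List Char) (counterCur counterNonDig : Int) : List (Option String) :=
  match chars with
  | [] => [some flightNum, none]
  | x :: rest =>
    let counterNonDig := if !PySem.Chars.isdigit x then counterNonDig + 1 else counterNonDig
    let counterCur := counterCur + 1
    if counterNonDig == 3 then
      let counterCur := counterCur - 1
      [some (PySem.Str.slice flightNum none (some counterCur)),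
       some (PySem.Str.slice flightNum (some counterCur) none)]
    else
      sepLoopA flightNum rest counterCur counterNonDig

def seperateFlightNum (flightNum : String) : List (Option String) :=
  sepLoopA flightNum flightNum.toList 0 0

-- ===== PORT B =====
-- DIGITS = "0123456789"
def pyDigits : List Char := "0123456789".toList

-- hand port of s.lstrip(DIGITS) (PySem has only the two-sided stripChars): drop the leading
-- characters that belong to DIGITS — exact for this character set
def lstripDigits (s : String) : String :=
  String.ofList (s.toList.dropWhile (fun c => pyDigits.contains c))

-- t = lstrip; t = t[1:].lstrip; t = t[1:].lstrip; if t: slice at len(flightNum)-len(t)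
def seperateFlightNum_alt (flightNum : String) : List (Option String) :=
  let t1 := lstripDigits flightNum
  let t2 := lstripDigits (PySem.Str.slice t1 (some 1) none)
  let t3 := lstripDigits (PySem.Str.slice t2 (some 1) none)
  if t3.toList ≠ [] then
    let k : Int := (PySem.Str.len flightNum : Int) - (PySem.Str.len t3 : Int)
    [some (PySem.Str.slice flightNum none (some k)),
     some (PySem.Str.slice flightNum (some k) none)]
  else
    [some flightNum, none]

-- ===== PRECONDITION & SPEC =====
def Spec_seperateFlightNum (flightNum : String) (out : List (Option String)) : Prop := out = seperateFlightNum_alt flightNum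
instance (flightNum : String) (out : List (Option String)) : Decidable (Spec_seperateFlightNum flightNum out) := by unfold Spec_seperateFlightNum; infer_instance

-- ===== CLAIM (what is proved, stated in full; the proofs are below) =====
def Claim_equal_seperateFlightNum : Prop := ∀ (flightNum : String), Dom_seperateFlightNum flightNum → Spec_seperateFlightNum flightNum (seperateFlightNum flightNum)

-- ===== LEMMAS AND PROOFS =====

-- positions (as Nats, relative) of the non-digit characters of a char list
def ndPos : List Char → List Nat
  | [] => []
  | c :: cs => if PySem.Chars.isdigit c then (ndPos cs).map (· + 1)
               else 0 :: (ndPos cs).map (· + 1)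

theorem sepLoopA_eq (flightNum : String) (chars : List Char) : ∀ (cur : Int) (nd : Nat), nd ≤ 2 →
    sepLoopA flightNum chars cur (nd : Int) =
      match (ndPos chars)[2 - nd]? with
      | some j => [some (PySem.Str.slice flightNum none (some (cur + (j : Int)))),
                   some (PySem.Str.slice flightNum (some (cur + (j : Int))) none)]
      | none => [some flightNum, none] := by
  induction chars with
  | nil => intro cur nd _; simp [sepLoopA, ndPos]
  | cons c cs ih =>
    intro cur nd hnd
    rw [ndPos, sepLoopA]
    by_cases h : PySem.Chars.isdigit c = true
    · simp only [h, Bool.not_true, Bool.false_eq_true, if_false, if_true]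
      rw [if_neg (by simp only [beq_iff_eq]; omega : ¬ (((nd : Int) == 3) = true))]
      rw [ih (cur + 1) nd hnd]
      rcases h2 : (ndPos cs)[2 - nd]? with _ | j
      · simp [List.getElem?_map, h2]
      · simp only [List.getElem?_map, h2, Option.map_some]
        push_cast
        ring_nf
    · have hb : PySem.Chars.isdigit c = false := by simpa using h
      simp only [hb, Bool.not_false, Bool.false_eq_true, if_false, if_true]
      rcases Nat.lt_or_ge nd 2 with hlt | hge
      · rw [if_neg (by simp only [beq_iff_eq]; omega : ¬ (((nd : Int) + 1 == 3) = true))]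
        have hcast : (nd : Int) + 1 = ((nd + 1 : Nat) : Int) := by push_cast; ring
        rw [hcast, ih (cur + 1) (nd + 1) (by omega)]
        rw [show 2 - (nd + 1) = 1 - nd from by omega]
        rw [show 2 - nd = (1 - nd) + 1 from by omega, List.getElem?_cons_succ]
        rcases h2 : (ndPos cs)[1 - nd]? with _ | j
        · simp [List.getElem?_map, h2]
        · simp only [List.getElem?_map, h2, Option.map_some]
          push_cast
          ring_nf
      · have h2 : nd = 2 := by omega
        subst h2
        rw [if_pos (by norm_num)]
        norm_num

-- membership in DIGITS is exactly isdigit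
theorem contains_pyDigits (c : Char) : pyDigits.contains c = PySem.Chars.isdigit c := by
  simp only [pyDigits, String.reduceToList, List.contains_eq_mem, Char.isValue, List.mem_cons, Char.ext_iff,
    Char.reduceVal, UInt32.ext_iff, Char.toNat_val, UInt32.reduceToNat, List.not_mem_nil, or_false, Bool.decide_or,
    PySem.Chars.isdigit, Char.le_def, UInt32.le_iff_toNat_le]
  rw [Bool.eq_iff_iff]
  simp only [Bool.or_eq_true, Bool.and_eq_true, decide_eq_true_eq]
  omega

-- proof-side abbreviation for the digit-stripping step, stated on lists
def dwI (l : List Char) : List Char := l.dropWhile PySem.Chars.isdigit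

theorem lstripDigits_toList (s : String) : (lstripDigits s).toList = dwI s.toList := by
  unfold lstripDigits dwI
  rw [String.toList_ofList]
  congr 1
  funext c
  exact contains_pyDigits c

-- structure of ndPos through one digit-stripping step
theorem ndPos_structure : ∀ (l : List Char),
    (dwI l = [] → ndPos l = []) ∧
    (∀ x t, dwI l = x :: t →
      ndPos l = (l.length - t.length - 1) :: (ndPos t).map (· + (l.length - t.length))) := by
  intro l
  induction l with
  | nil => exact ⟨fun _ => rfl, fun x t h => by simp [dwI] at h⟩
  | cons c cs ih =>
    by_cases h : PySem.Chars.isdigit c = true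
    · have hd : dwI (c :: cs) = dwI cs := by simp [dwI, h]
      constructor
      · intro h0
        rw [hd] at h0
        rw [ndPos, if_pos h, ih.1 h0]
        rfl
      · intro x t h1
        rw [hd] at h1
        rw [ndPos, if_pos h, ih.2 x t h1]
        have h1' : List.dropWhile PySem.Chars.isdigit cs = x :: t := h1
        have hlen : t.length < cs.length := by
          have := List.length_dropWhile_le PySem.Chars.isdigit cs
          rw [h1'] at this; simp at this; omega
        simp only [List.map_cons, List.map_map, List.length_cons]
        congr 1
        · omega
        · refine List.map_congr_left (fun j _ => ?_)
          simp only [Function.comp_apply]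
          omega
    · have hb : PySem.Chars.isdigit c = false := by simpa using h
      have hd : dwI (c :: cs) = c :: cs := by simp [dwI, hb]
      constructor
      · intro h0; rw [hd] at h0; exact absurd h0 (by simp)
      · intro x t h1
        rw [hd] at h1
        obtain ⟨rfl, rfl⟩ : c = x ∧ cs = t := by
          constructor <;> [exact (List.cons.injEq _ _ _ _ ▸ h1).1; exact (List.cons.injEq _ _ _ _ ▸ h1).2]
        rw [ndPos, if_neg (by simp [hb])]
        simp only [List.length_cons]
        congr 1
        · omega
        · refine List.map_congr_left (fun j _ => ?_)
          omega

-- ===== VERDICT (by name: the statement is the Claim_ definition above) =====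
set_option maxHeartbeats 1000000 in
theorem seperateFlightNum_spec : Claim_equal_seperateFlightNum := by
  intro fn _
  unfold Spec_seperateFlightNum seperateFlightNum seperateFlightNum_alt
  have hA := sepLoopA_eq fn fn.toList 0 0 (by omega)
  simp only [Nat.cast_zero, zero_add, Nat.sub_zero] at hA
  rw [hA]
  set L := fn.toList with hL
  clear_value L
  -- unfold the three stripping stages to dwI on lists
  have ht1 : (lstripDigits fn).toList = dwI L := by rw [hL]; exact lstripDigits_toList fn
  have hs1 : (PySem.Str.slice (lstripDigits fn) (some 1) none).toList = (dwI L).tail := by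
    simp only [PySem.Str.toList_slice, PySem.Chars.slice_eq_listSlice, PySem.List.slice_from_one, ht1]
  have ht2 : (lstripDigits (PySem.Str.slice (lstripDigits fn) (some 1) none)).toList
      = dwI (dwI L).tail := by
    rw [lstripDigits_toList, hs1]
  have hs2 : (PySem.Str.slice (lstripDigits (PySem.Str.slice (lstripDigits fn) (some 1) none)) (some 1) none).toList
      = (dwI (dwI L).tail).tail := by
    simp only [PySem.Str.toList_slice, PySem.Chars.slice_eq_listSlice, PySem.List.slice_from_one, ht2]
  have ht3 : (lstripDigits (PySem.Str.slice (lstripDigits (PySem.Str.slice (lstripDigits fn) (some 1) none)) (some 1) none)).toList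
      = dwI (dwI (dwI L).tail).tail := by
    rw [lstripDigits_toList, hs2]
  simp only [PySem.Str.len_eq, ht3]
  rcases h1 : dwI L with _ | ⟨x1, r1⟩
  · -- no non-digit at all
    have hnd : ndPos L = [] := (ndPos_structure L).1 h1
    simp [hnd, dwI]
  · have hnd1 := (ndPos_structure L).2 x1 r1 h1
    have hlen1 : r1.length < L.length := by
      have := List.length_dropWhile_le PySem.Chars.isdigit L
      rw [show (L.dropWhile PySem.Chars.isdigit).length = (dwI L).length from rfl, h1] at this
      simp at this; omega
    simp only [List.tail_cons]
    rcases h2 : dwI r1 with _ | ⟨x2, r2⟩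
    · have hnd2 : ndPos r1 = [] := (ndPos_structure r1).1 h2
      simp [hnd1, hnd2, dwI]
    · have hnd2 := (ndPos_structure r1).2 x2 r2 h2
      have hlen2 : r2.length < r1.length := by
        have := List.length_dropWhile_le PySem.Chars.isdigit r1
        rw [show (r1.dropWhile PySem.Chars.isdigit).length = (dwI r1).length from rfl, h2] at this
        simp at this; omega
      simp only [List.tail_cons]
      rcases h3 : dwI r2 with _ | ⟨x3, r3⟩
      · have hnd3 : ndPos r2 = [] := (ndPos_structure r2).1 h3
        simp [hnd1, hnd2, hnd3]
      · have hnd3 := (ndPos_structure r2).2 x3 r3 h3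
        have hlen3 : r3.length < r2.length := by
          have := List.length_dropWhile_le PySem.Chars.isdigit r2
          rw [show (r2.dropWhile PySem.Chars.isdigit).length = (dwI r2).length from rfl, h3] at this
          simp at this; omega
        -- the third non-digit exists: index (ndPos L)[2]?
        have hidx : (ndPos L)[2]? = some (L.length - r3.length - 1) := by
          rw [hnd1]
          rw [List.getElem?_cons_succ, List.getElem?_map]
          rw [hnd2]
          rw [List.getElem?_cons_succ, List.getElem?_map]
          rw [hnd3]
          simp only [List.getElem?_cons_zero, Option.map_some]
          exact congrArg some (by omega)
        rw [hidx]
        rw [if_pos (List.cons_ne_nil x3 r3), ← hL]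
        have hk : (L.length : Int) - ((x3 :: r3).length : Int) = ((L.length - r3.length - 1 : Nat) : Int) := by
          simp only [List.length_cons]
          push_cast
          omega
        rw [hk]
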